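-- pv_equiv track=rewrite | github.com/Sean-XinLi/slurmforge | slurmforge/src/slurmforge/sweep/expansion.py | iter_axis_combos
-- ===== SOURCE A (Python) =====
-- import itertools
-- from typing import Any, Iterator
--
-- def iter_axis_combos(axes: tuple[tuple[str, tuple[Any, ...]], ...]) -> Iterator[list[tuple[str, Any]]]:
--     if not axes:
--         yield []
--         return
--
--     keys = [key for key, _values in axes]
--     values = [list(axis_values) for _key, axis_values in axes]
--     for combo in itertools.product(*values):
--         yield list(zip(keys, combo))
-- ===== SOURCE B (Python) =====
-- def iter_axis_combos(axes):
--     if not axes: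
--         yield []
--         return
--     (key, axis_values), rest = axes[0], axes[1:]
--     for v in axis_values:
--         for tail in iter_axis_combos(rest):
--             yield [(key, v)] + tail
-- ===== Notes on version B (the rewrite author's own statement) =====
-- stated objective: simpler
-- what changed: Replaces the keys/values split plus itertools.product plus zip with a direct recursion on the axes: fix the first axis's (key, value) and recurse on the rest, last axis varying fastest.
import Mathlib
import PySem

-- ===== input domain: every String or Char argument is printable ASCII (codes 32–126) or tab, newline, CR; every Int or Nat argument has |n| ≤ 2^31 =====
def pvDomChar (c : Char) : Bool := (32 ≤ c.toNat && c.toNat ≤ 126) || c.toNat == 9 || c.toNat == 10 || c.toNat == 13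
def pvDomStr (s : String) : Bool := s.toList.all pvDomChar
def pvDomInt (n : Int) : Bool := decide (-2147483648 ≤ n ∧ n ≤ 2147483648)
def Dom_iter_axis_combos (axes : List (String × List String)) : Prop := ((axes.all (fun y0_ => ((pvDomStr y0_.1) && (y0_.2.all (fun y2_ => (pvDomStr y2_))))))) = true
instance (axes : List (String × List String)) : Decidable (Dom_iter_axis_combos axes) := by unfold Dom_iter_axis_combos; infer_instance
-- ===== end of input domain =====

-- B replaces the keys/values split + itertools.product + zip with a direct recursion on the axes (simpler decomposition, same cost).


-- ===== PORT A =====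
-- itertools.product(*values) transliterated as the standard fold: result = [[]]; for pool: result = [x+[y] for x in result for y in pool]
def iter_axis_combos (axes : List (String × List String)) : List (List (String × String)) :=
  if axes = [] then [[]]
  else
    let keys := axes.map (fun a => a.1)
    let values := axes.map (fun a => a.2)
    let prods := values.foldl (fun acc pool => acc.flatMap (fun x => pool.map (fun y => x ++ [y]))) [[]]
    prods.map (fun combo => List.zip keys combo)

-- ===== PORT B =====
def iter_axis_combos_alt : List (String × List String) → List (List (String × String))
  | [] => [[]]
  | (key, axis_values) :: rest =>
      axis_values.flatMap (fun v => (iter_axis_combos_alt rest).map (fun tail => (key, v) :: tail))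

-- ===== PRECONDITION & SPEC =====
def Spec_iter_axis_combos (axes : List (String × List String)) (out : List (List (String × String))) : Prop := out = iter_axis_combos_alt axes
instance (axes : List (String × List String)) (out : List (List (String × String))) : Decidable (Spec_iter_axis_combos axes out) := by unfold Spec_iter_axis_combos; infer_instance

-- ===== CLAIM (what is proved, stated in full; the proofs are below) =====
def Claim_equal_iter_axis_combos : Prop := ∀ (axes : List (String × List String)), Dom_iter_axis_combos axes → Spec_iter_axis_combos axes (iter_axis_combos axes)

-- ===== LEMMAS AND PROOFS =====

-- right-nested Cartesian product of the value pools, first pool outermost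
def pvProdR : List (List String) → List (List String)
  | [] => [[]]
  | pool :: rest => pool.flatMap (fun v => (pvProdR rest).map (fun t => v :: t))

theorem pv_foldl_prod (values : List (List String)) (acc : List (List String)) :
    values.foldl (fun acc pool => acc.flatMap (fun x => pool.map (fun y => x ++ [y]))) acc
      = acc.flatMap (fun c => (pvProdR values).map (fun t => c ++ t)) := by
  induction values generalizing acc with
  | nil => simp [pvProdR]
  | cons pool rest ih =>
      simp only [List.foldl_cons, ih, pvProdR, List.flatMap_assoc, List.map_flatMap,
        List.flatMap_map, List.map_map, Function.comp_def, List.append_assoc,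
        List.singleton_append]

theorem pv_zip_prod (axes : List (String × List String)) :
    (pvProdR (axes.map (fun a => a.2))).map
        (fun combo => List.zip (axes.map (fun a => a.1)) combo)
      = iter_axis_combos_alt axes := by
  induction axes with
  | nil => simp [pvProdR, iter_axis_combos_alt]
  | cons a rest ih =>
      obtain ⟨key, vs⟩ := a
      simp only [List.map_cons, pvProdR, iter_axis_combos_alt, List.map_flatMap,
        List.map_map, Function.comp_def, List.zip_cons_cons, ← ih]

-- ===== VERDICT (by name: the statement is the Claim_ definition above) =====
theorem iter_axis_combos_spec : Claim_equal_iter_axis_combos := by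
  intro axes _
  unfold Spec_iter_axis_combos iter_axis_combos
  split
  · subst ‹axes = []›; rfl
  · simp only [pv_foldl_prod, List.flatMap_cons, List.flatMap_nil, List.nil_append,
      List.map_id_fun', ← pv_zip_prod]
    simp
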